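-- pv_equiv track=rewrite | github.com/angrysky56/td_inspired_llm | compare_models.py | generate_test_prompts
-- ===== SOURCE A (Python) =====
-- def generate_test_prompts(num_samples):
--     """Generate a set of test prompts for evaluation."""
--     base_prompts = [
--         "The quick brown fox jumps over the",
--         "In the beginning, there was",
--         "Once upon a time, a brave knight",
--         "The scientist discovered a new",
--         "When I looked outside, I saw a",
--         "The most important thing to remember is",
--         "If you want to succeed, you must",
--         "The future of artificial intelligence depends on",
--         "The main difference between humans and machines is",
--         "To solve this problem, we need to",
--         "The role of dopamine in learning is to",
--         "Temporal difference learning works by",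
--         "The belief state representation helps to",
--         "Prospective prediction is better than retrospective learning because",
--         "The key to effective contingency learning is",
--         "When making decisions under uncertainty, we should",
--         "The value of a state depends on",
--         "To predict future rewards accurately, an agent must",
--         "The difference between TD errors and prediction errors is",
--         "A good reinforcement learning algorithm will"
--     ]
--
--     # If num_samples <= len(base_prompts), return a subset
--     if num_samples <= len(base_prompts):
--         return base_prompts[:num_samples]
--
--     # Otherwise, return all base prompts plus some variations
--     result = base_prompts.copy()
--
--     variations = [
--         " consider that",
--         " remember that",
--         " understand that",
--         " realize that",
--         " know that"
--     ]
--
--     # Add variations until we reach num_samples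
--     i = 0
--     while len(result) < num_samples:
--         base_idx = i % len(base_prompts)
--         var_idx = (i // len(base_prompts)) % len(variations)
--         result.append(base_prompts[base_idx] + variations[var_idx])
--         i += 1
--
--     return result[:num_samples]
-- ===== SOURCE B (Python) =====
-- def generate_test_prompts(num_samples):
--     """Generate a set of test prompts for evaluation."""
--     base_prompts = [
--         "The quick brown fox jumps over the",
--         "In the beginning, there was",
--         "Once upon a time, a brave knight",
--         "The scientist discovered a new",
--         "When I looked outside, I saw a",
--         "The most important thing to remember is",
--         "If you want to succeed, you must",
--         "The future of artificial intelligence depends on",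
--         "The main difference between humans and machines is",
--         "To solve this problem, we need to",
--         "The role of dopamine in learning is to",
--         "Temporal difference learning works by",
--         "The belief state representation helps to",
--         "Prospective prediction is better than retrospective learning because",
--         "The key to effective contingency learning is",
--         "When making decisions under uncertainty, we should",
--         "The value of a state depends on",
--         "To predict future rewards accurately, an agent must",
--         "The difference between TD errors and prediction errors is",
--         "A good reinforcement learning algorithm will"
--     ]
--
--     if num_samples <= len(base_prompts):
--         return base_prompts[:num_samples]
--
--     variations = [
--         " consider that",
--         " remember that",
--         " understand that",
--         " realize that",
--         " know that"
--     ]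
--
--     # Full cross product in the order A's index arithmetic enumerates it:
--     # inner loop over base prompts, outer over variations.
--     combos = [b + v for v in variations for b in base_prompts]
--     q, r = divmod(num_samples - len(base_prompts), len(combos))
--     return base_prompts + combos * q + combos[:r]
-- ===== Notes on version B (the rewrite author's own statement) =====
-- stated objective: simpler
-- what changed: Replaces A's element-by-element while loop with per-item modular index arithmetic by building the full base-times-variation cross product once and assembling the tail with divmod: whole copies of the cross product (C-level list repetition, no per-item Python work) plus a prefix slice.
import Mathlib
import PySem

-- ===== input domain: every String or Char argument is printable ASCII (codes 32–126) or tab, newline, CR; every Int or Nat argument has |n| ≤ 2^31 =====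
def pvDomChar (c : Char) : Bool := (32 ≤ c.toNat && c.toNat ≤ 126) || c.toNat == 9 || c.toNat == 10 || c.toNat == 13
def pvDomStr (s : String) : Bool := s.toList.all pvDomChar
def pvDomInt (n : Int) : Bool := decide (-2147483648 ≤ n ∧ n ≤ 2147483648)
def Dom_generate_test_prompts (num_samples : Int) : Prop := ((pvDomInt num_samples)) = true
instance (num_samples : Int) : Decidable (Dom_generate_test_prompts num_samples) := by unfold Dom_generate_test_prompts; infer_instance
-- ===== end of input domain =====

-- B replaces A's element-by-element while loop with per-item modular index arithmetic by building
-- the full base-times-variation cross product once and taking whole copies plus a prefix via divmod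
-- (objective: simpler). Both programs are pure; equivalence is about the return value.

-- Shared module-level string literals (both Pythons declare the same two lists).
def pvBasePrompts : List String := [
  "The quick brown fox jumps over the",
  "In the beginning, there was",
  "Once upon a time, a brave knight",
  "The scientist discovered a new",
  "When I looked outside, I saw a",
  "The most important thing to remember is",
  "If you want to succeed, you must",
  "The future of artificial intelligence depends on",
  "The main difference between humans and machines is",
  "To solve this problem, we need to",
  "The role of dopamine in learning is to",
  "Temporal difference learning works by",
  "The belief state representation helps to",
  "Prospective prediction is better than retrospective learning because",
  "The key to effective contingency learning is",
  "When making decisions under uncertainty, we should",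
  "The value of a state depends on",
  "To predict future rewards accurately, an agent must",
  "The difference between TD errors and prediction errors is",
  "A good reinforcement learning algorithm will"]

def pvVariations : List String := [
  " consider that",
  " remember that",
  " understand that",
  " realize that",
  " know that"]

-- ===== PORT A =====
-- A's while loop appends exactly one element per iteration starting from length 20,
-- so it runs exactly (num_samples - 20) times with i = 0,1,2,…; ported as a fold over that range.
def generate_test_prompts (num_samples : Int) : List String :=
  if num_samples ≤ (pvBasePrompts.length : Int) then
    PySem.List.slice pvBasePrompts none (some num_samples)
  else
    let result :=
      (PySem.List.pyRange 0 (num_samples - (pvBasePrompts.length : Int)) 1).foldl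
        (fun res i =>
          res ++ [PySem.List.pyGetD pvBasePrompts
                    (PySem.Int.mod i (pvBasePrompts.length : Int)) ""
                  ++ PySem.List.pyGetD pvVariations
                    (PySem.Int.mod (PySem.Int.floordiv i (pvBasePrompts.length : Int))
                      (pvVariations.length : Int)) ""])
        pvBasePrompts
    PySem.List.slice result none (some num_samples)

-- ===== PORT B =====
def generate_test_prompts_alt (num_samples : Int) : List String :=
  if num_samples ≤ (pvBasePrompts.length : Int) then
    PySem.List.slice pvBasePrompts none (some num_samples)
  else
    let combos := pvVariations.flatMap (fun v => pvBasePrompts.map (fun b => b ++ v))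
    let q := PySem.Int.floordiv (num_samples - (pvBasePrompts.length : Int)) (combos.length : Int)
    let r := PySem.Int.mod (num_samples - (pvBasePrompts.length : Int)) (combos.length : Int)
    pvBasePrompts ++ PySem.List.pyRepeat combos q ++ PySem.List.slice combos none (some r)

-- ===== PRECONDITION & SPEC =====
def Spec_generate_test_prompts (num_samples : Int) (out : List String) : Prop := out = generate_test_prompts_alt num_samples
instance (num_samples : Int) (out : List String) : Decidable (Spec_generate_test_prompts num_samples out) := by unfold Spec_generate_test_prompts; infer_instance

-- ===== CLAIM (what is proved, stated in full; the proofs are below) =====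
def Claim_equal_generate_test_prompts : Prop := ∀ (num_samples : Int), Dom_generate_test_prompts num_samples → Spec_generate_test_prompts num_samples (generate_test_prompts num_samples)

-- ===== LEMMAS AND PROOFS =====

-- The per-index item A appends, written over Nat indexes.
def pvItem (j : Nat) : String :=
  PySem.List.pyGetD pvBasePrompts ((j % 20 : Nat) : Int) ""
    ++ PySem.List.pyGetD pvVariations (((j / 20) % 5 : Nat) : Int) ""

lemma pvItem_period (j : Nat) : pvItem (j + 100) = pvItem j := by
  unfold pvItem
  have h1 : (j + 100) % 20 = j % 20 := by omega
  have h2 : (j + 100) / 20 % 5 = j / 20 % 5 := by omega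
  rw [h1, h2]

def pvCombos : List String := pvVariations.flatMap (fun v => pvBasePrompts.map (fun b => b ++ v))

set_option maxRecDepth 8192 in
lemma pvCombos_eq : pvCombos = (List.range 100).map pvItem := by decide

-- Unrolling a 100-periodic stream: the first n items are (n / 100) whole periods plus
-- the first (n % 100) items of a period.
lemma pvCycle (n : Nat) :
    (List.range n).map pvItem
      = (List.replicate (n / 100) ((List.range 100).map pvItem)).flatten
        ++ ((List.range 100).map pvItem).take (n % 100) := by
  induction n using Nat.strong_induction_on with
  | _ n ih =>
    by_cases h : n < 100
    · rw [Nat.div_eq_of_lt h, Nat.mod_eq_of_lt h]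
      simp only [List.replicate_zero, List.flatten_nil, List.nil_append]
      rw [← List.map_take, List.take_range, Nat.min_eq_left (le_of_lt h)]
    · rw [Nat.not_lt] at h
      have hn : n = 100 + (n - 100) := by omega
      rw [hn, List.range_add, List.map_append, List.map_map]
      have hmap : (List.range (n - 100)).map (pvItem ∘ (fun k => 100 + k))
          = (List.range (n - 100)).map pvItem := by
        refine List.map_congr_left (fun j _ => ?_)
        simpa [Nat.add_comm] using pvItem_period j
      rw [hmap, ih (n - 100) (by omega)]
      have hd : (100 + (n - 100)) / 100 = (n - 100) / 100 + 1 := by omega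
      have hm : (100 + (n - 100)) % 100 = (n - 100) % 100 := by omega
      rw [hd, hm, List.replicate_succ, List.flatten_cons, List.append_assoc]

lemma pvF_eq_item (j : Nat) :
    PySem.List.pyGetD pvBasePrompts (PySem.Int.mod (j : Int) (pvBasePrompts.length : Int)) ""
      ++ PySem.List.pyGetD pvVariations
          (PySem.Int.mod (PySem.Int.floordiv (j : Int) (pvBasePrompts.length : Int))
            (pvVariations.length : Int)) ""
      = pvItem j := by
  have hb : (pvBasePrompts.length : Int) = ((20 : Nat) : Int) := by decide
  have hv : (pvVariations.length : Int) = ((5 : Nat) : Int) := by decide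
  rw [hb, hv, PySem.Int.mod_natCast, PySem.Int.floordiv_natCast, PySem.Int.mod_natCast]
  rfl

theorem generate_test_prompts_eq (num_samples : Int) :
    generate_test_prompts num_samples = generate_test_prompts_alt num_samples := by
  unfold generate_test_prompts generate_test_prompts_alt
  by_cases hle : num_samples ≤ (pvBasePrompts.length : Int)
  · simp [hle]
  · rw [if_neg hle, if_neg hle]
    rw [not_le] at hle
    have hb : (pvBasePrompts.length : Int) = 20 := by decide
    -- the number of loop iterations, as a Nat
    set k : Nat := (num_samples - (pvBasePrompts.length : Int)).toNat with hk
    have hkc : (num_samples - (pvBasePrompts.length : Int)) = (k : Int) := by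
      rw [hk]; omega
    dsimp only
    -- A's loop: fold appending one item per index = base ++ map of the per-index item
    rw [hkc, PySem.List.foldl_append_singleton_eq_map, PySem.List.pyRange_zero_natCast,
      List.map_map]
    have hmap : (List.range k).map
        ((fun i => PySem.List.pyGetD pvBasePrompts (PySem.Int.mod i (pvBasePrompts.length : Int)) ""
            ++ PySem.List.pyGetD pvVariations
              (PySem.Int.mod (PySem.Int.floordiv i (pvBasePrompts.length : Int))
                (pvVariations.length : Int)) "") ∘ (fun n : Nat => (n : Int)))
        = (List.range k).map pvItem :=
      List.map_congr_left (fun j _ => pvF_eq_item j)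
    rw [hmap]
    -- the built list has length exactly num_samples, so the final [:num_samples] is the identity
    have hlen : (pvBasePrompts ++ (List.range k).map pvItem).length = num_samples.toNat := by
      simp [pvBasePrompts]
      omega
    rw [PySem.List.slice_to _ (by omega : (0:Int) ≤ num_samples),
      List.take_of_length_le (le_of_eq hlen)]
    -- B's side: fold the cross product into pvCombos, then divmod into whole copies + prefix
    rw [show pvVariations.flatMap (fun v => pvBasePrompts.map (fun b => b ++ v)) = pvCombos from rfl]
    have hcl : (pvCombos.length : Int) = ((100 : Nat) : Int) := by decide
    rw [hcl, PySem.Int.floordiv_natCast, PySem.Int.mod_natCast,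
      PySem.List.slice_to _ (Int.natCast_nonneg _)]
    have hrep : PySem.List.pyRepeat pvCombos ((k / 100 : Nat) : Int)
        = (List.replicate (k / 100) pvCombos).flatten := by
      simp [PySem.List.pyRepeat]
      rw [show ((k : Int) / 100).toNat = k / 100 from by omega]
    rw [hrep, Int.toNat_natCast, pvCombos_eq, pvCycle k]
    simp [List.append_assoc]

-- ===== VERDICT (by name: the statement is the Claim_ definition above) =====
theorem generate_test_prompts_spec : Claim_equal_generate_test_prompts := by
  intro n _
  unfold Spec_generate_test_prompts
  exact generate_test_prompts_eq n
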